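-- pv_equiv track=rewrite | github.com/median-dispersion/GMT-Geiger-Counter | Tools/LogParser.py | getLogMessages
-- ===== SOURCE A (Python) =====
-- def getLogMessages(data):
--
--     # All log messages
--     messages = {
--
--         "geigerCounter":     [],
--         "cosmicRayDetector": [],
--         "systemInfo":        [],
--         "systemEvents":      []
--
--     }
--
--     # For every message in the data
--     for message in data:
--
--         # Depending on the message type add it to the specific message list
--         match(message["type"]):
--
--             case "geigerCounter":     messages["geigerCounter"].append(message)
--             case "cosmicRayDetector": messages["cosmicRayDetector"].append(message)
--             case "system":            messages["systemInfo"].append(message)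
--             case "event":             messages["systemEvents"].append(message)
--
--     # Return log messages
--     return messages
-- ===== SOURCE B (Python) =====
-- def getLogMessages(data):
--     # Build each bucket with its own comprehension filtering on the message type.
--     return {
--         "geigerCounter":     [m for m in data if m["type"] == "geigerCounter"],
--         "cosmicRayDetector": [m for m in data if m["type"] == "cosmicRayDetector"],
--         "systemInfo":        [m for m in data if m["type"] == "system"],
--         "systemEvents":      [m for m in data if m["type"] == "event"],
--     }
-- ===== Notes on version B (the rewrite author's own statement) =====
-- stated objective: idiomatic
-- what changed: Single-pass match/append dispatch into a pre-built dict replaced by a dict literal of four independent list comprehensions, each filtering the data by one type.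
import Mathlib
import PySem

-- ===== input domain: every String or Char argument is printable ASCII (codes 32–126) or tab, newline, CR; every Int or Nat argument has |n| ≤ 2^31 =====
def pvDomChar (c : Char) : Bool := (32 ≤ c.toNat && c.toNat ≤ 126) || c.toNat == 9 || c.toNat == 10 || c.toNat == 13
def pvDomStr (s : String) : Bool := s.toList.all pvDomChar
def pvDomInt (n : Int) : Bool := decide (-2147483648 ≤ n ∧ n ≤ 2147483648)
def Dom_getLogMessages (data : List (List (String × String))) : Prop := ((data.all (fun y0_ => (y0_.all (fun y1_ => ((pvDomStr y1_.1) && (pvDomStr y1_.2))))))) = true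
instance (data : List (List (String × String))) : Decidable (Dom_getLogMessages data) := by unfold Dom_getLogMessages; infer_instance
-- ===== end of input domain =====

-- B replaces A's single pass with match/append dispatch by four independent filters (one per bucket); same values, different decomposition.

-- ===== PORT A =====
-- message["type"]: first-match lookup in the association list (Python dict access)
def lmGet? (m : List (String × String)) (k : String) : Option String :=
  (m.find? (fun p => p.1 == k)).map (·.2)

-- messages[k].append(msg): modify the list stored at key k in place
def lmAppendAt (ms : List (String × List (List (String × String)))) (k : String)
    (msg : List (String × String)) : List (String × List (List (String × String))) :=
  ms.map (fun p => if p.1 == k then (p.1, p.2 ++ [msg]) else p)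

def getLogMessages (data : List (List (String × String))) : List (String × List (List (String × String))) :=
  data.foldl (fun ms msg =>
    match lmGet? msg "type" with
    | some "geigerCounter"     => lmAppendAt ms "geigerCounter" msg
    | some "cosmicRayDetector" => lmAppendAt ms "cosmicRayDetector" msg
    | some "system"            => lmAppendAt ms "systemInfo" msg
    | some "event"             => lmAppendAt ms "systemEvents" msg
    | _ => ms)   -- `none` is a KeyError in Python: excluded by Pre_
    [("geigerCounter", []), ("cosmicRayDetector", []), ("systemInfo", []), ("systemEvents", [])]

-- ===== PORT B =====
def lmGetB? (m : List (String × String)) (k : String) : Option String :=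
  (m.find? (fun p => p.1 == k)).map (·.2)

def getLogMessages_alt (data : List (List (String × String))) : List (String × List (List (String × String))) :=
  [ ("geigerCounter",     data.filter (fun m => lmGetB? m "type" == some "geigerCounter")),
    ("cosmicRayDetector", data.filter (fun m => lmGetB? m "type" == some "cosmicRayDetector")),
    ("systemInfo",        data.filter (fun m => lmGetB? m "type" == some "system")),
    ("systemEvents",      data.filter (fun m => lmGetB? m "type" == some "event")) ]

-- ===== PRECONDITION & SPEC =====
-- Pre_ excludes messages without a "type" key, on which Python A (and B) raise KeyError.
def Pre_getLogMessages (data : List (List (String × String))) : Prop :=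
  (data.all (fun m => m.any (fun p => p.1 == "type"))) = true
instance (data : List (List (String × String))) : Decidable (Pre_getLogMessages data) := by
  unfold Pre_getLogMessages; infer_instance

def pvWitness_getLogMessages : (List (List (String × String))) :=
  [[("type", "geigerCounter"), ("value", "5")], [("type", "event")]]

def Spec_getLogMessages (data : List (List (String × String))) (out : List (String × List (List (String × String)))) : Prop := out = getLogMessages_alt data
instance (data : List (List (String × String))) (out : List (String × List (List (String × String)))) : Decidable (Spec_getLogMessages data out) := by unfold Spec_getLogMessages; infer_instance

-- ===== CLAIM (what is proved, stated in full; the proofs are below) =====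
def Claim_equal_getLogMessages : Prop := ∀ (data : List (List (String × String))), Dom_getLogMessages data → Pre_getLogMessages data → Spec_getLogMessages data (getLogMessages data)

-- ===== LEMMAS AND PROOFS =====

-- Loop invariant: folding A's step from a 4-bucket state appends the four filters.
theorem lm_fold (data : List (List (String × String)))
    (g c s e : List (List (String × String))) :
    data.foldl (fun ms msg =>
      match lmGet? msg "type" with
      | some "geigerCounter"     => lmAppendAt ms "geigerCounter" msg
      | some "cosmicRayDetector" => lmAppendAt ms "cosmicRayDetector" msg
      | some "system"            => lmAppendAt ms "systemInfo" msg
      | some "event"             => lmAppendAt ms "systemEvents" msg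
      | _ => ms)
      [("geigerCounter", g), ("cosmicRayDetector", c), ("systemInfo", s), ("systemEvents", e)]
    = [ ("geigerCounter",     g ++ data.filter (fun m => lmGet? m "type" == some "geigerCounter")),
        ("cosmicRayDetector", c ++ data.filter (fun m => lmGet? m "type" == some "cosmicRayDetector")),
        ("systemInfo",        s ++ data.filter (fun m => lmGet? m "type" == some "system")),
        ("systemEvents",      e ++ data.filter (fun m => lmGet? m "type" == some "event")) ] := by
  induction data generalizing g c s e with
  | nil => simp
  | cons m rest ih =>
    have hg : lmAppendAt [("geigerCounter", g), ("cosmicRayDetector", c), ("systemInfo", s), ("systemEvents", e)] "geigerCounter" m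
        = [("geigerCounter", g ++ [m]), ("cosmicRayDetector", c), ("systemInfo", s), ("systemEvents", e)] := by
      simp [lmAppendAt]
    have hc : lmAppendAt [("geigerCounter", g), ("cosmicRayDetector", c), ("systemInfo", s), ("systemEvents", e)] "cosmicRayDetector" m
        = [("geigerCounter", g), ("cosmicRayDetector", c ++ [m]), ("systemInfo", s), ("systemEvents", e)] := by
      simp [lmAppendAt]
    have hs : lmAppendAt [("geigerCounter", g), ("cosmicRayDetector", c), ("systemInfo", s), ("systemEvents", e)] "systemInfo" m
        = [("geigerCounter", g), ("cosmicRayDetector", c), ("systemInfo", s ++ [m]), ("systemEvents", e)] := by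
      simp [lmAppendAt]
    have he : lmAppendAt [("geigerCounter", g), ("cosmicRayDetector", c), ("systemInfo", s), ("systemEvents", e)] "systemEvents" m
        = [("geigerCounter", g), ("cosmicRayDetector", c), ("systemInfo", s), ("systemEvents", e ++ [m])] := by
      simp [lmAppendAt]
    simp only [List.foldl_cons, List.filter_cons]
    rcases h : lmGet? m "type" with _ | t
    · simp [h, ih]
    · by_cases h1 : t = "geigerCounter"
      · subst h1; simp [h, hg, ih]
      · by_cases h2 : t = "cosmicRayDetector"
        · subst h2; simp [h, hc, ih]
        · by_cases h3 : t = "system"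
          · subst h3; simp [h, hs, ih, h1, h2]
          · by_cases h4 : t = "event"
            · subst h4; simp [h, he, ih]
            · have hm : (match some t with
                | some "geigerCounter"     => lmAppendAt [("geigerCounter", g), ("cosmicRayDetector", c), ("systemInfo", s), ("systemEvents", e)] "geigerCounter" m
                | some "cosmicRayDetector" => lmAppendAt [("geigerCounter", g), ("cosmicRayDetector", c), ("systemInfo", s), ("systemEvents", e)] "cosmicRayDetector" m
                | some "system"            => lmAppendAt [("geigerCounter", g), ("cosmicRayDetector", c), ("systemInfo", s), ("systemEvents", e)] "systemInfo" m
                | some "event"             => lmAppendAt [("geigerCounter", g), ("cosmicRayDetector", c), ("systemInfo", s), ("systemEvents", e)] "systemEvents" m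
                | _ => [("geigerCounter", g), ("cosmicRayDetector", c), ("systemInfo", s), ("systemEvents", e)]) = [("geigerCounter", g), ("cosmicRayDetector", c), ("systemInfo", s), ("systemEvents", e)] := by
                split <;> simp_all
              simp [h, hm, ih, h1, h2, h3, h4]

-- ===== VERDICT (by name: the statement is the Claim_ definition above) =====
theorem getLogMessages_spec : Claim_equal_getLogMessages := by
  intro data _ _
  show getLogMessages data = getLogMessages_alt data
  unfold getLogMessages getLogMessages_alt
  rw [lm_fold]
  simp [lmGet?, lmGetB?]
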